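-- pv_equiv track=rewrite | github.com/AmberR-pua/shuffle-randomness-explorer | appbackup.py | ensure_unique_config_labels
-- ===== SOURCE A (Python) =====
-- def ensure_unique_config_labels(configs_meta):
--     counts = {}
--     for meta in configs_meta:
--         name = str(meta.get("display_name", meta.get("prefix", "Config"))).strip() or str(meta.get("prefix", "Config"))
--         counts[name] = counts.get(name, 0) + 1
--
--     seen = {}
--     normalized = []
--     for meta in configs_meta:
--         base_name = str(meta.get("display_name", meta.get("prefix", "Config"))).strip() or str(meta.get("prefix", "Config"))
--         seen[base_name] = seen.get(base_name, 0) + 1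
--         final_name = base_name
--         if counts[base_name] > 1:
--             final_name = f"{base_name} ({meta['prefix']})"
--         normalized.append({**meta, "display_name": final_name})
--     return normalized
-- ===== SOURCE B (Python) =====
-- def ensure_unique_config_labels(configs_meta):
--     def base(meta):
--         return str(meta.get("display_name", meta.get("prefix", "Config"))).strip() or str(meta.get("prefix", "Config"))
--
--     result = []
--     for i, meta in enumerate(configs_meta):
--         b = base(meta)
--         if any(j != i and base(other) == b for j, other in enumerate(configs_meta)):
--             label = f"{b} ({meta['prefix']})"
--         else:
--             label = b
--         result.append({**meta, "display_name": label})
--     return result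
-- ===== Notes on version B (the rewrite author's own statement) =====
-- stated objective: simpler
-- what changed: B drops both of A's dictionaries (the counting dict and the dead 'seen' dict) and their precomputation pass: for each element it decides duplication directly by scanning the list once for another index with the same base name, a dict-free quadratic rescan instead of A's hash-count-then-lookup.
import Mathlib
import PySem

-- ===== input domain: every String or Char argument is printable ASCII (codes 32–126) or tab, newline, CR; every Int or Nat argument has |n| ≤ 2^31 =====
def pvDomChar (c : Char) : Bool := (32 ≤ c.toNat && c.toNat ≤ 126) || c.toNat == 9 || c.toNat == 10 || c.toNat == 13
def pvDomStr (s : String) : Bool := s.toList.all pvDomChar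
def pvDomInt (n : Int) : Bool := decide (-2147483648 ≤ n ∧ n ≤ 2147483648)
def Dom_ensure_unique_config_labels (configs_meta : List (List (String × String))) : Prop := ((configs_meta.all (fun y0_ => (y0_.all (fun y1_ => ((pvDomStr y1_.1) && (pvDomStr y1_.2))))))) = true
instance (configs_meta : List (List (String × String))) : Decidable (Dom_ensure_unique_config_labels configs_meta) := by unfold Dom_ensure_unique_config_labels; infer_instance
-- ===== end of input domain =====

-- B drops A's counting dict and dead 'seen' dict: it decides duplication per element by scanning the
-- list for another index with the same base name (dict-free, quadratic). Objective: simpler.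

-- shared helper: the base display name of one meta dict (the same expression both Pythons compute)
def pvBaseName (mta : List (String × String)) : String :=
  let d := PySem.Dict.ofList mta
  let raw := PySem.Str.strip (d.getD "display_name" (d.getD "prefix" "Config"))
  if raw = "" then d.getD "prefix" "Config" else raw

-- ===== PORT A =====
-- meta['prefix'] is ported as getD "prefix" "": Python raises KeyError exactly where the key is
-- absent and the count is > 1, and Pre_ excludes those inputs.
def ensure_unique_config_labels (configs_meta : List (List (String × String))) : List (List (String × String)) :=
  let counts : PySem.Dict String Int :=
    configs_meta.foldl (fun d mta => d.modify (pvBaseName mta) 0 (· + 1)) PySem.Dict.empty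
  let res :=
    configs_meta.foldl
      (fun (p : PySem.Dict String Int × List (List (String × String))) mta =>
        let base_name := pvBaseName mta
        let seen := p.1.modify base_name 0 (· + 1)
        let final_name :=
          if counts.getD base_name 0 > 1 then
            base_name ++ " (" ++ (PySem.Dict.ofList mta).getD "prefix" "" ++ ")"
          else base_name
        (seen, p.2 ++ [((PySem.Dict.ofList mta).insert "display_name" final_name).items]))
      (PySem.Dict.empty, [])
  res.2

-- ===== PORT B =====
def ensure_unique_config_labels_alt (configs_meta : List (List (String × String))) : List (List (String × String)) :=
  (PySem.List.enumerate configs_meta 0).foldl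
    (fun res p =>
      let b := pvBaseName p.2
      let label :=
        if (PySem.List.enumerate configs_meta 0).any
             (fun q => q.1 != p.1 && pvBaseName q.2 == b) then
          b ++ " (" ++ (PySem.Dict.ofList p.2).getD "prefix" "" ++ ")"
        else b
      res ++ [((PySem.Dict.ofList p.2).insert "display_name" label).items])
    []

-- ===== PRECONDITION & SPEC =====
-- Pre_ excludes exactly the inputs on which Python A raises KeyError: some mta whose base name
-- occurs more than once lacks a "prefix" key (B raises KeyError there too).
def Pre_ensure_unique_config_labels (configs_meta : List (List (String × String))) : Prop :=
  ∀ mta ∈ configs_meta,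
    (configs_meta.map pvBaseName).count (pvBaseName mta) > 1 →
      (PySem.Dict.ofList mta).contains "prefix" = true
instance (configs_meta : List (List (String × String))) : Decidable (Pre_ensure_unique_config_labels configs_meta) := by
  unfold Pre_ensure_unique_config_labels; infer_instance

def pvWitness_ensure_unique_config_labels : (List (List (String × String))) :=
  [[("display_name", "A"), ("prefix", "p1")], [("display_name", "A"), ("prefix", "p2")], [("display_name", "B")]]

def Spec_ensure_unique_config_labels (configs_meta : List (List (String × String))) (out : List (List (String × String))) : Prop := out = ensure_unique_config_labels_alt configs_meta
instance (configs_meta : List (List (String × String))) (out : List (List (String × String))) : Decidable (Spec_ensure_unique_config_labels configs_meta out) := by unfold Spec_ensure_unique_config_labels; infer_instance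

-- ===== CLAIM (what is proved, stated in full; the proofs are below) =====
def Claim_equal_ensure_unique_config_labels : Prop := ∀ (configs_meta : List (List (String × String))), Dom_ensure_unique_config_labels configs_meta → Pre_ensure_unique_config_labels configs_meta → Spec_ensure_unique_config_labels configs_meta (ensure_unique_config_labels configs_meta)

-- ===== LEMMAS AND PROOFS =====

-- the common per-element result, with the global base-name multiset of l fixed
def pvOutElem (l : List (List (String × String))) (mta : List (String × String)) : List (String × String) :=
  let b := pvBaseName mta
  let final := if ((l.map pvBaseName).count b : Int) > 1
               then b ++ " (" ++ (PySem.Dict.ofList mta).getD "prefix" "" ++ ")" else b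
  ((PySem.Dict.ofList mta).insert "display_name" final).items

-- A's counting dict looks up the number of occurrences of a base name
theorem pv_counts_getD (l : List (List (String × String))) (b : String) :
    (l.foldl (fun d mta => d.modify (pvBaseName mta) 0 (· + 1)) PySem.Dict.empty).getD b 0
      = ((l.map pvBaseName).count b : Int) := by
  rw [← List.foldl_map (f := pvBaseName) (g := fun d x => PySem.Dict.modify d x 0 (· + 1)),
      PySem.Dict.getD_foldl_modify_add_one]
  simp

-- A's second loop: the dead 'seen' dict rides along as paired state and the results accumulate
theorem pv_fold_pair (f : List (String × String) → List (String × String)) :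
    ∀ (l' : List (List (String × String))) (s : PySem.Dict String Int)
      (acc : List (List (String × String))),
    (l'.foldl (fun p mta => (p.1.modify (pvBaseName mta) 0 (· + 1), p.2 ++ [f mta])) (s, acc)).2
      = acc ++ l'.map f := by
  intro l'
  induction l' with
  | nil => simp
  | cons m t ih => intro s acc; simp [ih]

theorem port_A_eq_map (l : List (List (String × String))) :
    ensure_unique_config_labels l = l.map (pvOutElem l) := by
  unfold ensure_unique_config_labels
  rw [pv_fold_pair]
  simp only [List.nil_append]
  apply List.map_congr_left
  intro m _
  simp only [pv_counts_getD, pvOutElem]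

-- two distinct members make a list longer than one
theorem pv_one_lt_length {α : Type} [DecidableEq α] {s : List α} {a b : α}
    (ha : a ∈ s) (hb : b ∈ s) (hne : a ≠ b) : 1 < s.length := by
  have hb' : b ∈ s.erase a := List.mem_erase_of_ne (Ne.symm hne) |>.mpr hb
  have h1 : 0 < (s.erase a).length := List.length_pos_of_mem hb'
  have h2 : (s.erase a).length = s.length - 1 := List.length_erase_of_mem ha
  omega

-- B's per-element rescan decides exactly 'this base name occurs at another index',
-- which is exactly A's 'global count of this base name exceeds one'.
set_option maxHeartbeats 1000000 in
theorem pv_any_other_iff (l : List (List (String × String))) (k : Nat) (hk : k < l.length) :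
    ((PySem.List.enumerate l 0).any
        (fun q => q.1 != ((0 : Int) + (k : Int)) && pvBaseName q.2 == pvBaseName (l[k]'hk)))
      = decide (1 < (l.map pvBaseName).count (pvBaseName (l[k]'hk))) := by
  obtain ⟨b, hb⟩ : ∃ b, b = pvBaseName (l[k]'hk) := ⟨_, rfl⟩
  rw [← hb]
  obtain ⟨s, hs⟩ : ∃ s, s = (PySem.List.enumerate l 0).filter (fun q => pvBaseName q.2 == b) :=
    ⟨_, rfl⟩
  have hcount : (l.map pvBaseName).count b = s.length := by
    have h1 : (l.map pvBaseName).count b = List.countP (fun m => pvBaseName m == b) l := by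
      rw [List.count_eq_countP, List.countP_map]; rfl
    have h2 : List.countP (fun m => pvBaseName m == b) l
        = List.countP (fun q : Int × List (String × String) => pvBaseName q.2 == b)
            (PySem.List.enumerate l 0) := by
      conv_lhs => rw [← PySem.List.map_snd_enumerate l 0]
      rw [List.countP_map]; rfl
    rw [h1, h2, hs, List.countP_eq_length_filter]
  have hself : ((0 : Int) + (k : Int), l[k]'hk) ∈ s := by
    rw [hs]
    exact List.mem_filter.mpr
      ⟨(PySem.List.mem_enumerate_iff l 0 _).mpr ⟨k, hk, rfl⟩, by simp [hb]⟩
  rw [hcount]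
  by_cases h : ∃ q ∈ PySem.List.enumerate l 0,
      (q.1 != ((0 : Int) + (k : Int)) && pvBaseName q.2 == b) = true
  · obtain ⟨q, hq, hpq⟩ := h
    have hq1 : q.1 ≠ (0 : Int) + (k : Int) := by
      intro he; simp [he] at hpq
    have hq2 : pvBaseName q.2 = b := by
      simp only [Bool.and_eq_true, beq_iff_eq] at hpq; exact hpq.2
    have hqs : q ∈ s := by
      rw [hs]; exact List.mem_filter.mpr ⟨hq, by simp [hq2]⟩
    have hlen : 1 < s.length :=
      pv_one_lt_length hqs hself (by intro he; exact hq1 (by rw [he]))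
    rw [List.any_eq_true.mpr ⟨q, hq, hpq⟩, decide_eq_true hlen]
  · have hnone : (PySem.List.enumerate l 0).any
        (fun q => q.1 != ((0 : Int) + (k : Int)) && pvBaseName q.2 == b) = false := by
      rw [← Bool.not_eq_true, List.any_eq_true]
      exact h
    have hlen : ¬ 1 < s.length := by
      intro hlt
      obtain ⟨q1, q2, t, hss⟩ : ∃ q1 q2 t, s = q1 :: q2 :: t := by
        match s, hlt with
        | q1 :: q2 :: t, _ => exact ⟨q1, q2, t, rfl⟩
      have hpw : s.Pairwise (fun p q => p.1 < q.1) :=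
        List.Pairwise.sublist (hs ▸ List.filter_sublist) (PySem.List.pairwise_lt_enumerate l 0)
      have h12 : q1.1 < q2.1 := by
        rw [hss] at hpw
        exact (List.pairwise_cons.mp hpw).1 q2 (List.mem_cons_self)
      have hm1 : q1 ∈ s := by rw [hss]; exact List.mem_cons_self
      have hm2 : q2 ∈ s := by rw [hss]; exact List.mem_cons_of_mem _ List.mem_cons_self
      have key : ∀ q ∈ s, q.1 = (0 : Int) + (k : Int) := by
        intro q hqs
        by_contra hne
        have hqe : q ∈ PySem.List.enumerate l 0 := List.mem_of_mem_filter (hs ▸ hqs)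
        have hqb : pvBaseName q.2 = b := by
          have := (List.mem_filter.mp (hs ▸ hqs)).2
          simpa using this
        exact h ⟨q, hqe, by simp [hqb]; omega⟩
      have e1 := key q1 hm1
      have e2 := key q2 hm2
      omega
    rw [hnone, decide_eq_false hlen]

theorem port_B_eq_map (l : List (List (String × String))) :
    ensure_unique_config_labels_alt l = l.map (pvOutElem l) := by
  unfold ensure_unique_config_labels_alt
  rw [PySem.List.foldl_append_singleton_eq_map]
  simp only [List.nil_append]
  apply List.ext_getElem?
  intro k
  rw [List.getElem?_map, List.getElem?_map, PySem.List.getElem?_enumerate]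
  by_cases hk : k < l.length
  · rw [List.getElem?_eq_getElem hk]
    simp only [Option.map_some]
    congr 1
    rw [pvOutElem]
    simp only [pv_any_other_iff l k hk]
    by_cases hc : 1 < (l.map pvBaseName).count (pvBaseName (l[k]'hk))
    · rw [if_pos (by simp [hc]), if_pos (by exact_mod_cast hc)]
    · rw [if_neg (by simp [hc]), if_neg (by intro h; exact hc (by exact_mod_cast h))]
  · rw [List.getElem?_eq_none (by omega)]; simp

-- ===== VERDICT (by name: the statement is the Claim_ definition above) =====
theorem ensure_unique_config_labels_spec : Claim_equal_ensure_unique_config_labels := by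
  intro l _ _
  unfold Spec_ensure_unique_config_labels
  rw [port_A_eq_map, port_B_eq_map]
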